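-- pv_equiv track=rewrite | github.com/apertium/apertium-pol-rus | dev/from_z.py | par_splitter
-- ===== SOURCE A (Python) =====
-- import copy
--
-- def par_splitter(info):
-- 	pstact = {k:[] for k in info.keys()}
-- 	pstpss, prsact, prspss, other = copy.deepcopy(pstact), copy.deepcopy(pstact), copy.deepcopy(pstact), copy.deepcopy(pstact)
-- 	for lexeme in info:
-- 		for wordform in info[lexeme]:
-- 			if 'pstpss' in wordform[1] and 'pred' not in wordform[1]:
-- 				pstpss[lexeme].append(wordform)
-- 			elif 'pstact' in wordform[1] and 'adv' not in wordform[1]: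
-- 				pstact[lexeme].append(wordform)
-- 			elif 'prsact' in wordform[1] and 'adv' not in wordform[1]:
-- 				prsact[lexeme].append(wordform)
-- 			elif 'prspss' in wordform[1]:
-- 				prspss[lexeme].append(wordform)
-- 			else:
-- 				other[lexeme].append(wordform)
-- 	for d in pstpss, pstact, prsact, prspss, other:
-- 		for l in info:
-- 			if d[l] == []:
-- 				d.pop(l)
-- 	return pstpss, pstact, prsact, prspss, other
-- ===== SOURCE B (Python) =====
-- def par_splitter(info):
-- 	def cls(tag):
-- 		if 'pstpss' in tag and 'pred' not in tag:
-- 			return 0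
-- 		if 'pstact' in tag and 'adv' not in tag:
-- 			return 1
-- 		if 'prsact' in tag and 'adv' not in tag:
-- 			return 2
-- 		if 'prspss' in tag:
-- 			return 3
-- 		return 4
-- 	def bucket(i):
-- 		d = {}
-- 		for lexeme, wordforms in info.items():
-- 			sel = [wf for wf in wordforms if cls(wf[1]) == i]
-- 			if sel:
-- 				d[lexeme] = sel
-- 		return d
-- 	return bucket(0), bucket(1), bucket(2), bucket(3), bucket(4)
-- ===== Notes on version B (the rewrite author's own statement) =====
-- stated objective: alternative
-- what changed: B drops A's shared-state scheme (five pre-populated deepcopied dicts mutated in one pass, then an empty-key pruning pass) and instead builds each of the five dictionaries independently: for each category index it makes one pass over info, filters each lexeme's wordforms by a numeric classification function, and assigns the filtered list only when nonempty, so no mutation of shared dicts and no prune pass exist.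
-- outside the precondition, e.g. on par_splitter({'a': [['x']]}): A raises IndexError, B raises IndexError
import Mathlib
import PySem

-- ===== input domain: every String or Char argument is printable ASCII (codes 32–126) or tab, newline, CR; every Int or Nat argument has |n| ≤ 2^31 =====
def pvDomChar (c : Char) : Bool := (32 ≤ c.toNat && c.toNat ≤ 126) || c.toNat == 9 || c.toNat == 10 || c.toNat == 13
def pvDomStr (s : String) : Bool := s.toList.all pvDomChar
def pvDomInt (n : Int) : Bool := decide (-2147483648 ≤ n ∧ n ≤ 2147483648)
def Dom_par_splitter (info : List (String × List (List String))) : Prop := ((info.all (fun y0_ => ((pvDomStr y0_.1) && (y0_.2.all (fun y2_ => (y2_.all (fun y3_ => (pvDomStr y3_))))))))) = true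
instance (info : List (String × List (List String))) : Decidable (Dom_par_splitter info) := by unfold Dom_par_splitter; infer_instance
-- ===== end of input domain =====

-- B replaces A's shared-state scheme (five pre-populated deepcopied dicts mutated in one
-- pass, then an empty-key pruning pass) by five independent filtering passes: each
-- dictionary is built directly by filtering every lexeme's wordforms by a numeric
-- classification function and assigning the filtered list only when nonempty.

abbrev ParD := PySem.Dict String (List (List String))
abbrev ParSt := ParD × ParD × ParD × ParD × ParD

-- ===== PORT A =====
/-- A's inner if/elif chain for one wordform of `lexeme` (keys are always present, so
`d[lexeme].append(wordform)` is `modify`). -/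
def stepA (lexeme : String) (st : ParSt) (wordform : List String) : ParSt :=
  let t := (PySem.List.pyGet? wordform 1).getD ""  -- wordform[1]; Pre_ excludes the IndexError case
  match st with
  | (pstpss, pstact, prsact, prspss, other) =>
    if PySem.Str.isIn "pstpss" t && !PySem.Str.isIn "pred" t then
      (pstpss.modify lexeme [] (· ++ [wordform]), pstact, prsact, prspss, other)
    else if PySem.Str.isIn "pstact" t && !PySem.Str.isIn "adv" t then
      (pstpss, pstact.modify lexeme [] (· ++ [wordform]), prsact, prspss, other)
    else if PySem.Str.isIn "prsact" t && !PySem.Str.isIn "adv" t then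
      (pstpss, pstact, prsact.modify lexeme [] (· ++ [wordform]), prspss, other)
    else if PySem.Str.isIn "prspss" t then
      (pstpss, pstact, prsact, prspss.modify lexeme [] (· ++ [wordform]), other)
    else
      (pstpss, pstact, prsact, prspss, other.modify lexeme [] (· ++ [wordform]))

/-- A's second pass: `for l in info: if d[l] == []: d.pop(l)` (keys are queried once each
under Pre_, and are present, so `d[l]` is `getD`). -/
def pruneA (lexemes : List String) (d : ParD) : ParD :=
  lexemes.foldl (fun d l => if d.getD l [] = [] then d.erase l else d) d

def par_splitter (info : List (String × List (List String))) : (List (String × List (List String))) × (List (String × List (List String))) × (List (String × List (List String))) × (List (String × List (List String))) × (List (String × List (List String))) :=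
  let infoD := PySem.Dict.mk info
  -- pstact = {k:[] for k in info.keys()}; the four deepcopies are the same value
  let init : ParD := PySem.Dict.ofList (infoD.keys.map (fun k => (k, ([] : List (List String)))))
  let st := infoD.keys.foldl
    (fun st lexeme => (infoD.getD lexeme []).foldl (stepA lexeme) st)
    (init, init, init, init, init)
  ((pruneA infoD.keys st.1).items, (pruneA infoD.keys st.2.1).items,
   (pruneA infoD.keys st.2.2.1).items, (pruneA infoD.keys st.2.2.2.1).items,
   (pruneA infoD.keys st.2.2.2.2).items)

-- ===== PORT B =====
/-- B's helper `cls(tag)`: early-return chain mapping a tag to its category index. -/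
def clsB (tag : String) : Nat :=
  if PySem.Str.isIn "pstpss" tag && !PySem.Str.isIn "pred" tag then 0
  else if PySem.Str.isIn "pstact" tag && !PySem.Str.isIn "adv" tag then 1
  else if PySem.Str.isIn "prsact" tag && !PySem.Str.isIn "adv" tag then 2
  else if PySem.Str.isIn "prspss" tag then 3
  else 4

/-- B's helper `bucket(i)`: one pass over info, filtering each lexeme's wordforms and
assigning the filtered list only when nonempty. -/
def bucketB (i : Nat) (info : List (String × List (List String))) : ParD :=
  info.foldl
    (fun d p =>
      let sel := p.2.filter (fun wf => clsB ((PySem.List.pyGet? wf 1).getD "") == i)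
      if sel = [] then d else d.insert p.1 sel)
    PySem.Dict.empty

def par_splitter_alt (info : List (String × List (List String))) : (List (String × List (List String))) × (List (String × List (List String))) × (List (String × List (List String))) × (List (String × List (List String))) × (List (String × List (List String))) :=
  ((bucketB 0 info).items, (bucketB 1 info).items, (bucketB 2 info).items,
   (bucketB 3 info).items, (bucketB 4 info).items)

-- ===== PRECONDITION & SPEC =====
-- Pre_ excludes (a) wordforms shorter than 2 entries, on which A raises IndexError at
-- wordform[1], and (b) association lists with duplicate lexeme keys, which do not
-- represent a Python dict (A's parameter is a dict, where duplicates collapse).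
def Pre_par_splitter (info : List (String × List (List String))) : Prop :=
  (info.map Prod.fst).Nodup ∧ ∀ p ∈ info, ∀ wf ∈ p.2, 2 ≤ wf.length
instance (info : List (String × List (List String))) : Decidable (Pre_par_splitter info) := by
  unfold Pre_par_splitter; infer_instance

def pvWitness_par_splitter : (List (String × List (List String))) :=
  [("myt", [["mytyj", "v pstpss"], ["myvshij", "v pstact"], ["myt", "v inf"]]), ("byt", [])]

def Spec_par_splitter (info : List (String × List (List String))) (out : (List (String × List (List String))) × (List (String × List (List String))) × (List (String × List (List String))) × (List (String × List (List String))) × (List (String × List (List String)))) : Prop := out = par_splitter_alt info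
def pvDecEq2 : DecidableEq ((List (String × List (List String))) × (List (String × List (List String)))) := inferInstance
def pvDecEq3 : DecidableEq ((List (String × List (List String))) × (List (String × List (List String))) × (List (String × List (List String)))) := @instDecidableEqProd _ _ inferInstance pvDecEq2
def pvDecEq4 : DecidableEq ((List (String × List (List String))) × (List (String × List (List String))) × (List (String × List (List String))) × (List (String × List (List String)))) := @instDecidableEqProd _ _ inferInstance pvDecEq3
def pvDecEq5 : DecidableEq ((List (String × List (List String))) × (List (String × List (List String))) × (List (String × List (List String))) × (List (String × List (List String))) × (List (String × List (List String)))) := @instDecidableEqProd _ _ inferInstance pvDecEq4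
instance (info : List (String × List (List String))) (out : (List (String × List (List String))) × (List (String × List (List String))) × (List (String × List (List String))) × (List (String × List (List String))) × (List (String × List (List String)))) : Decidable (Spec_par_splitter info out) := by unfold Spec_par_splitter; exact pvDecEq5 out (par_splitter_alt info)

-- ===== CLAIM (what is proved, stated in full; the proofs are below) =====
def Claim_equal_par_splitter : Prop := ∀ (info : List (String × List (List String))), Dom_par_splitter info → Pre_par_splitter info → Spec_par_splitter info (par_splitter info)

-- ===== LEMMAS AND PROOFS =====

/-- classification index of a wordform (0..4) -/
def clsOf (wf : List String) : Nat := clsB ((PySem.List.pyGet? wf 1).getD "")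

/-- the wordforms of `p` that fall into category `i` -/
def selF (i : Nat) (p : String × List (List String)) : List (List String) :=
  p.2.filter (fun wf => clsOf wf == i)

/-- the canonical value of category dictionary `i` as an items list -/
def canon (i : Nat) (info : List (String × List (List String))) : List (String × List (List String)) :=
  (info.filter (fun p => decide (selF i p ≠ []))).map (fun p => (p.1, selF i p))

def flatP (info : List (String × List (List String))) : List (String × List String) :=
  info.flatMap (fun p => p.2.map (fun wf => (p.1, wf)))

def fillI (i : Nat) (q : List (String × List String)) (d : ParD) : ParD :=
  (q.filter (fun x => clsOf x.2 == i)).foldl (fun d p => d.modify p.1 [] (· ++ [p.2])) d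

def valI (i : Nat) (info : List (String × List (List String))) (c : String) : List (List String) :=
  (((flatP info).filter (fun x => clsOf x.2 == i)).filter (fun x => x.1 == c)).map (·.2)

def initD (info : List (String × List (List String))) : ParD :=
  PySem.Dict.ofList ((info.map Prod.fst).map (fun k => (k, ([] : List (List String)))))

/-- proof-side: one B-shaped step routing a wordform by its class -/
def pushB (d : ParD) (lexeme : String) (wordform : List String) : ParD :=
  d.modify lexeme [] (· ++ [wordform])

def stepB (lexeme : String) (st : ParSt) (wordform : List String) : ParSt :=
  match st with
  | (d0, d1, d2, d3, d4) =>
    match clsOf wordform with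
    | 0 => (pushB d0 lexeme wordform, d1, d2, d3, d4)
    | 1 => (d0, pushB d1 lexeme wordform, d2, d3, d4)
    | 2 => (d0, d1, pushB d2 lexeme wordform, d3, d4)
    | 3 => (d0, d1, d2, pushB d3 lexeme wordform, d4)
    | _ => (d0, d1, d2, d3, pushB d4 lexeme wordform)

lemma stepB_eq (l : String) (st : ParSt) (wf : List String) :
    stepB l st wf =
      (if clsOf wf = 0 then pushB st.1 l wf else st.1,
       if clsOf wf = 1 then pushB st.2.1 l wf else st.2.1,
       if clsOf wf = 2 then pushB st.2.2.1 l wf else st.2.2.1,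
       if clsOf wf = 3 then pushB st.2.2.2.1 l wf else st.2.2.2.1,
       if clsOf wf = 4 then pushB st.2.2.2.2 l wf else st.2.2.2.2) := by
  obtain ⟨d0, d1, d2, d3, d4⟩ := st
  by_cases h1 : (PySem.Str.isIn "pstpss" ((PySem.List.pyGet? wf 1).getD "") && !PySem.Str.isIn "pred" ((PySem.List.pyGet? wf 1).getD "")) = true
  · simp only [stepB, clsOf, clsB, h1]
    try rfl
  by_cases h2 : (PySem.Str.isIn "pstact" ((PySem.List.pyGet? wf 1).getD "") && !PySem.Str.isIn "adv" ((PySem.List.pyGet? wf 1).getD "")) = true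
  · simp only [stepB, clsOf, clsB, h1, h2]
    try rfl
  by_cases h3 : (PySem.Str.isIn "prsact" ((PySem.List.pyGet? wf 1).getD "") && !PySem.Str.isIn "adv" ((PySem.List.pyGet? wf 1).getD "")) = true
  · simp only [stepB, clsOf, clsB, h1, h2, h3]
    try rfl
  by_cases h4 : (PySem.Str.isIn "prspss" ((PySem.List.pyGet? wf 1).getD "")) = true
  · simp only [stepB, clsOf, clsB, h1, h2, h3, h4]
    try rfl
  · simp only [stepB, clsOf, clsB, h1, h2, h3, h4]
    try rfl

lemma stepA_eq_stepB (l : String) (st : ParSt) (wf : List String) :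
    stepA l st wf = stepB l st wf := by
  obtain ⟨d0, d1, d2, d3, d4⟩ := st
  by_cases h1 : (PySem.Str.isIn "pstpss" ((PySem.List.pyGet? wf 1).getD "") && !PySem.Str.isIn "pred" ((PySem.List.pyGet? wf 1).getD "")) = true
  · simp only [stepA, stepB, clsOf, clsB, pushB, h1]
    try rfl
  by_cases h2 : (PySem.Str.isIn "pstact" ((PySem.List.pyGet? wf 1).getD "") && !PySem.Str.isIn "adv" ((PySem.List.pyGet? wf 1).getD "")) = true
  · simp only [stepA, stepB, clsOf, clsB, pushB, h1, h2]
    try rfl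
  by_cases h3 : (PySem.Str.isIn "prsact" ((PySem.List.pyGet? wf 1).getD "") && !PySem.Str.isIn "adv" ((PySem.List.pyGet? wf 1).getD "")) = true
  · simp only [stepA, stepB, clsOf, clsB, pushB, h1, h2, h3]
    try rfl
  by_cases h4 : (PySem.Str.isIn "prspss" ((PySem.List.pyGet? wf 1).getD "")) = true
  · simp only [stepA, stepB, clsOf, clsB, pushB, h1, h2, h3, h4]
    try rfl
  · simp only [stepA, stepB, clsOf, clsB, pushB, h1, h2, h3, h4]
    try rfl

lemma fillI_cons (i : Nat) (x : String × List String) (q : List (String × List String)) (d : ParD) :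
    fillI i (x :: q) d = fillI i q (if clsOf x.2 = i then d.modify x.1 [] (· ++ [x.2]) else d) := by
  simp only [fillI, List.filter_cons]
  split_ifs with h h' h'
  · rfl
  · simp [beq_iff_eq] at *; omega
  · simp [beq_iff_eq] at *; omega
  · rfl

lemma foldl_stepB_eq_fillI (q : List (String × List String)) (st : ParSt) :
    q.foldl (fun st x => stepB x.1 st x.2) st =
      (fillI 0 q st.1, fillI 1 q st.2.1, fillI 2 q st.2.2.1,
       fillI 3 q st.2.2.2.1, fillI 4 q st.2.2.2.2) := by
  induction q generalizing st with
  | nil => obtain ⟨d0, d1, d2, d3, d4⟩ := st; rfl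
  | cons x q ih =>
    rw [List.foldl_cons, stepB_eq, ih]
    simp only [fillI_cons]
    rfl

lemma foldB_nested_eq_flat (info : List (String × List (List String))) (st : ParSt) :
    info.foldl (fun st p => p.2.foldl (stepB p.1) st) st =
      (flatP info).foldl (fun st x => stepB x.1 st x.2) st := by
  induction info generalizing st with
  | nil => rfl
  | cons p info ih =>
    have hsplit : flatP (p :: info) = p.2.map (fun wf => (p.1, wf)) ++ flatP info := by
      simp [flatP]
    rw [List.foldl_cons, hsplit, List.foldl_append, ih]
    congr 1
    rw [List.foldl_map]

lemma mem_flatP_fst (info : List (String × List (List String))) (q : String × List String)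
    (h : q ∈ flatP info) : q.1 ∈ info.map Prod.fst := by
  simp only [flatP, List.mem_flatMap, List.mem_map] at h
  obtain ⟨p, hp, wf, _, rfl⟩ := h
  exact List.mem_map.mpr ⟨p, hp, rfl⟩

lemma getD_fillI (i : Nat) (q : List (String × List String)) (d : ParD) (c : String) :
    (fillI i q d).getD c [] =
      d.getD c [] ++ ((q.filter (fun x => clsOf x.2 == i)).filter (fun x => x.1 == c)).map (·.2) := by
  simp only [fillI]
  exact PySem.Dict.getD_foldl_modify_append _ _ _

lemma keys_fillI (i : Nat) (q : List (String × List String)) (d : ParD) :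
    (fillI i q d).keys = PySem.Set.update d.keys ((q.filter (fun x => clsOf x.2 == i)).map Prod.fst) := by
  simp only [fillI]
  exact PySem.Dict.keys_foldl_modify_key _ Prod.fst []
    (fun (_ : ParD) (p : String × List String) (v : List (List String)) => v ++ [p.2]) _

lemma nodup_keys_fillI (i : Nat) (q : List (String × List String)) (d : ParD)
    (h : d.keys.Nodup) : (fillI i q d).keys.Nodup := by
  simp only [fillI]
  exact PySem.Dict.nodup_keys_foldl_modify_key _ Prod.fst []
    (fun (_ : ParD) (p : String × List String) (v : List (List String)) => v ++ [p.2]) _ h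

lemma set_ofList_self {α : Type} [BEq α] [LawfulBEq α] (xs : List α) (h : xs.Nodup) :
    PySem.Set.ofList xs = xs := by
  have : PySem.Set.ofList xs = PySem.Set.update [] xs := rfl
  rw [this, PySem.Set.update_eq_append_of_disjoint _ _ h (by intro x _ hx; simp at hx)]
  simp

lemma getD_foldl_insert_nil (ps : List (String × List (List String)))
    (hps : ∀ p ∈ ps, p.2 = []) (d : ParD) (c : String) (hd : d.getD c [] = []) :
    (ps.foldl (fun acc p => acc.insert p.1 p.2) d).getD c [] = [] := by
  induction ps generalizing d with
  | nil => exact hd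
  | cons p ps ih =>
    rw [List.foldl_cons]
    refine ih (fun x hx => hps x (List.mem_cons_of_mem _ hx)) _ ?_
    rw [PySem.Dict.getD_insert]
    split_ifs with h
    · exact hps p (List.mem_cons_self ..)
    · exact hd

lemma getD_initD (info : List (String × List (List String))) (c : String) :
    (initD info).getD c [] = [] := by
  simp only [initD, PySem.Dict.ofList, PySem.Dict.update]
  refine getD_foldl_insert_nil _ ?_ _ _ (by simp)
  intro p hp
  simp only [List.mem_map] at hp
  obtain ⟨k, _, rfl⟩ := hp
  rfl

lemma keys_initD (info : List (String × List (List String)))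
    (h : (info.map Prod.fst).Nodup) : (initD info).keys = info.map Prod.fst := by
  have h1 : (initD info).keys = PySem.Set.update ((PySem.Dict.empty : ParD).keys)
      (((info.map Prod.fst).map (fun k => (k, ([] : List (List String))))).map Prod.fst) := by
    simp only [initD, PySem.Dict.ofList, PySem.Dict.update]
    exact PySem.Dict.keys_foldl_insert_key _ Prod.fst
      (fun (_ : ParD) (p : String × List (List String)) => p.2) _
  rw [h1]
  have h2 : (((info.map Prod.fst).map (fun k => (k, ([] : List (List String))))).map Prod.fst)
      = info.map Prod.fst := by simp
  rw [h2]
  have h3 : PySem.Set.update ((PySem.Dict.empty : ParD).keys) (info.map Prod.fst)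
      = PySem.Set.ofList (info.map Prod.fst) := rfl
  rw [h3, set_ofList_self _ h]

lemma keys_M (i : Nat) (info : List (String × List (List String)))
    (h : (info.map Prod.fst).Nodup) :
    (fillI i (flatP info) (initD info)).keys = info.map Prod.fst := by
  rw [keys_fillI, keys_initD _ h, PySem.Set.update_eq_append_filter]
  have : (PySem.Set.ofList (((flatP info).filter (fun x => clsOf x.2 == i)).map Prod.fst)).filter
      (fun y => !(PySem.Set.contains (info.map Prod.fst) y)) = [] := by
    rw [List.filter_eq_nil_iff]
    intro y hy
    have hy' : y ∈ ((flatP info).filter (fun x => clsOf x.2 == i)).map Prod.fst :=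
      (PySem.Set.mem_ofList _ _).mp hy
    simp only [List.mem_map, List.mem_filter] at hy'
    obtain ⟨q, ⟨hq, _⟩, rfl⟩ := hy'
    have := mem_flatP_fst _ _ hq
    simp [this]
  rw [this, List.append_nil]

lemma find?_filter_ne (items : List (String × List (List String))) (l c : String) :
    List.find? (fun p => p.1 == c) (items.filter (fun p => !(p.1 == l))) =
      if c = l then none else List.find? (fun p => p.1 == c) items := by
  induction items with
  | nil => simp
  | cons p items ih =>
    by_cases hpl : p.1 = l
    · rw [List.filter_cons_of_neg (by simp [hpl]), ih]
      by_cases hcl : c = l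
      · simp [hcl]
      · rw [if_neg hcl, if_neg hcl,
          List.find?_cons_of_neg (by simp; intro h; exact hcl (h ▸ hpl))]
    · rw [List.filter_cons_of_pos (by simp [hpl])]
      by_cases hpc : p.1 = c
      · rw [List.find?_cons_of_pos (by simp [hpc]), List.find?_cons_of_pos (by simp [hpc]),
          if_neg (fun hcl => hpl (by rw [hpc, hcl]))]
      · rw [List.find?_cons_of_neg (by simp [hpc]), List.find?_cons_of_neg (by simp [hpc]), ih]

lemma getD_erase (d : ParD) (l c : String) :
    (d.erase l).getD c [] = if c = l then [] else d.getD c [] := by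
  obtain ⟨items⟩ := d
  simp only [PySem.Dict.erase, PySem.Dict.getD, PySem.Dict.get?]
  rw [find?_filter_ne]
  split_ifs with h
  · rfl
  · rfl

lemma nodup_keys_erase (d : ParD) (l : String) (h : d.keys.Nodup) :
    (d.erase l).keys.Nodup := by
  obtain ⟨items⟩ := d
  simp only [PySem.Dict.erase, PySem.Dict.keys] at *
  exact (List.Sublist.map _ List.filter_sublist).nodup h

lemma pruneA_items (ls : List String) (d : ParD) (h : d.keys.Nodup) :
    (pruneA ls d).items =
      d.items.filter (fun p => !(decide (p.1 ∈ ls) && decide (d.getD p.1 [] = []))) := by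
  induction ls generalizing d with
  | nil => simp [pruneA]
  | cons l ls ih =>
    have hstep : pruneA (l :: ls) d = pruneA ls (if d.getD l [] = [] then d.erase l else d) := rfl
    rw [hstep]
    by_cases hl : d.getD l [] = []
    · rw [if_pos hl]
      have hnd : (d.erase l).keys.Nodup := nodup_keys_erase d l h
      rw [ih _ hnd]
      have hitems : (d.erase l).items = d.items.filter (fun p => !(p.1 == l)) := rfl
      rw [hitems, List.filter_filter]
      apply List.filter_congr
      intro p _
      by_cases hpl : p.1 = l
      · simp [hpl, getD_erase, hl]
      · simp [hpl, getD_erase, List.mem_cons]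
    · rw [if_neg hl, ih _ h]
      apply List.filter_congr
      intro p _
      by_cases hpl : p.1 = l
      · simp [hpl, hl, List.mem_cons]
      · simp [hpl, List.mem_cons]

lemma foldl_add_absorb {α : Type} [BEq α] [LawfulBEq α] (B : List α) (s : PySem.Set α)
    (h : ∀ x ∈ B, x ∈ s) : B.foldl PySem.Set.add s = s := by
  induction B with
  | nil => rfl
  | cons b B ih =>
    rw [List.foldl_cons]
    have : PySem.Set.add s b = s := by
      simp only [PySem.Set.add]
      rw [if_pos ((PySem.Set.contains_iff s b).mpr (h b (List.mem_cons_self ..)))]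
    rw [this]
    exact ih (fun x hx => h x (List.mem_cons_of_mem _ hx))

lemma ofList_const {α : Type} [BEq α] [LawfulBEq α] (B : List α) (k : α)
    (h : ∀ x ∈ B, x = k) : PySem.Set.ofList B = if B = [] then [] else [k] := by
  cases B with
  | nil => rfl
  | cons b B =>
    rw [if_neg (by simp)]
    have hbk : b = k := h b (List.mem_cons_self ..)
    rw [PySem.Set.ofList_eq_foldl, List.foldl_cons]
    have h1 : PySem.Set.add [] b = [k] := by simp [PySem.Set.add, PySem.Set.contains, hbk]
    rw [h1]
    exact foldl_add_absorb _ _ (fun x hx => by rw [h x (List.mem_cons_of_mem _ hx)]; exact List.mem_singleton.mpr rfl)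

lemma ofList_flat (i : Nat) (info : List (String × List (List String)))
    (h : (info.map Prod.fst).Nodup) :
    PySem.Set.ofList (((flatP info).filter (fun x => clsOf x.2 == i)).map Prod.fst) =
      (info.map Prod.fst).filter
        (fun k => decide (k ∈ ((flatP info).filter (fun x => clsOf x.2 == i)).map Prod.fst)) := by
  induction info with
  | nil => rfl
  | cons p info ih =>
    have hnd : (info.map Prod.fst).Nodup := (List.nodup_cons.mp h).2
    have hp : p.1 ∉ info.map Prod.fst := (List.nodup_cons.mp h).1
    have hsplit : ((flatP (p :: info)).filter (fun x => clsOf x.2 == i)).map Prod.fst =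
        ((p.2.map (fun wf => (p.1, wf))).filter (fun x => clsOf x.2 == i)).map Prod.fst ++
        ((flatP info).filter (fun x => clsOf x.2 == i)).map Prod.fst := by
      simp only [flatP, List.flatMap_cons, List.filter_append, List.map_append]
    rw [hsplit]
    set B := ((p.2.map (fun wf => (p.1, wf))).filter (fun x => clsOf x.2 == i)).map Prod.fst with hBdef
    set L' := ((flatP info).filter (fun x => clsOf x.2 == i)).map Prod.fst with hLdef
    have hBk : ∀ x ∈ B, x = p.1 := by
      intro x hx
      rw [hBdef] at hx
      simp only [List.mem_map, List.mem_filter, List.mem_map] at hx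
      obtain ⟨q, ⟨⟨wf, _, rfl⟩, _⟩, rfl⟩ := hx
      rfl
    have hL'mem : ∀ x ∈ L', x ∈ info.map Prod.fst := by
      intro x hx
      rw [hLdef] at hx
      simp only [List.mem_map, List.mem_filter] at hx
      obtain ⟨q, ⟨hq, _⟩, rfl⟩ := hx
      exact mem_flatP_fst _ _ hq
    have hpL' : p.1 ∉ L' := fun hc => hp (hL'mem _ hc)
    rw [PySem.Set.ofList_append, ofList_const B p.1 hBk]
    have hih : PySem.Set.ofList L' = (info.map Prod.fst).filter (fun k => decide (k ∈ L')) :=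
      ih hnd
    rw [List.map_cons, List.filter_cons]
    by_cases hBnil : B = []
    · rw [if_pos hBnil, hBnil]
      simp only [List.nil_append]
      have h0 : PySem.Set.update ([] : List String) L' = PySem.Set.ofList L' := rfl
      rw [h0, hih]
      split_ifs with hd
      · exact absurd (of_decide_eq_true hd) hpL'
      · rfl
    · rw [if_neg hBnil, PySem.Set.update_eq_append_filter]
      have hfil : (PySem.Set.ofList L').filter
          (fun y => !(PySem.Set.contains ([p.1] : PySem.Set String) y)) = PySem.Set.ofList L' := by
        apply List.filter_eq_self.mpr
        intro y hy
        have hyL : y ∈ L' := (PySem.Set.mem_ofList _ _).mp hy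
        have hyne : y ≠ p.1 := fun hc => hpL' (hc ▸ hyL)
        simp [PySem.Set.contains, hyne]
      rw [hfil, hih]
      have hpB : p.1 ∈ B ++ L' := by
        rcases hB : B with _ | ⟨b, B'⟩
        · exact absurd hB hBnil
        · have hb : b = p.1 := hBk b (by rw [hB]; exact List.mem_cons_self ..)
          rw [← hb]
          exact List.mem_append_left _ (List.mem_cons_self ..)
      split_ifs with hd
      case neg => exact absurd (decide_eq_true hpB) hd
      show p.1 :: (info.map Prod.fst).filter (fun k => decide (k ∈ L'))
          = p.1 :: (info.map Prod.fst).filter (fun k => decide (k ∈ B ++ L'))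
      congr 1
      apply List.filter_congr
      intro k hk
      have hkne : k ≠ p.1 := fun hc => hp (hc ▸ hk)
      simp only [decide_eq_decide, List.mem_append]
      constructor
      · exact fun h1 => Or.inr h1
      · rintro (h1 | h1)
        · exact absurd (hBk _ h1) hkne
        · exact h1

lemma valI_ne_iff (i : Nat) (info : List (String × List (List String))) (k : String) :
    valI i info k ≠ [] ↔ k ∈ ((flatP info).filter (fun x => clsOf x.2 == i)).map Prod.fst := by
  simp only [valI, ne_eq, List.map_eq_nil_iff, List.filter_eq_nil_iff, not_forall]
  constructor
  · rintro ⟨q, hq, hqk⟩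
    simp only [beq_iff_eq, not_not] at hqk
    exact List.mem_map.mpr ⟨q, hq, hqk⟩
  · intro hk
    obtain ⟨q, hq, rfl⟩ := List.mem_map.mp hk
    exact ⟨q, hq, by simp⟩

lemma flatP_filter_fst (info : List (String × List (List String))) (p : String × List (List String))
    (h : (info.map Prod.fst).Nodup) (hp : p ∈ info) :
    (flatP info).filter (fun x => x.1 == p.1) = p.2.map (fun wf => (p.1, wf)) := by
  induction info with
  | nil => cases hp
  | cons q info ih =>
    have hnd : (info.map Prod.fst).Nodup := (List.nodup_cons.mp h).2
    have hq : q.1 ∉ info.map Prod.fst := (List.nodup_cons.mp h).1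
    have hsplit : flatP (q :: info) = q.2.map (fun wf => (q.1, wf)) ++ flatP info := by
      simp [flatP]
    rw [hsplit, List.filter_append]
    rcases List.mem_cons.mp hp with heq | hp'
    · subst heq
      have h1 : (p.2.map (fun wf => (p.1, wf))).filter (fun x => x.1 == p.1)
          = p.2.map (fun wf => (p.1, wf)) := by
        apply List.filter_eq_self.mpr
        intro x hx
        obtain ⟨wf, _, rfl⟩ := List.mem_map.mp hx
        simp
      have h2 : (flatP info).filter (fun x => x.1 == p.1) = [] := by
        rw [List.filter_eq_nil_iff]
        intro x hx hc
        exact hq (by rw [← beq_iff_eq.mp hc]; exact mem_flatP_fst _ _ hx)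
      rw [h1, h2, List.append_nil]
    · have hne : q.1 ≠ p.1 := fun hc => hq (hc ▸ List.mem_map.mpr ⟨p, hp', rfl⟩)
      have h1 : (q.2.map (fun wf => (q.1, wf))).filter (fun x => x.1 == p.1) = [] := by
        rw [List.filter_eq_nil_iff]
        intro x hx hc
        obtain ⟨wf, _, rfl⟩ := List.mem_map.mp hx
        exact hne (beq_iff_eq.mp hc)
      rw [h1, List.nil_append, ih hnd hp']

lemma valI_eq_selF (i : Nat) (info : List (String × List (List String)))
    (p : String × List (List String)) (h : (info.map Prod.fst).Nodup) (hp : p ∈ info) :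
    valI i info p.1 = selF i p := by
  have hcomm : ((flatP info).filter (fun x => clsOf x.2 == i)).filter (fun x => x.1 == p.1)
      = ((flatP info).filter (fun x => x.1 == p.1)).filter (fun x => clsOf x.2 == i) := by
    rw [List.filter_filter, List.filter_filter]
    exact List.filter_congr (fun x _ => by rw [Bool.and_comm])
  rw [valI, hcomm, flatP_filter_fst info p h hp, List.filter_map]
  simp [selF, Function.comp_def]

/-- A's component i, after pruning, equals the group-by over the flat list with empty start. -/
lemma comp_eq (i : Nat) (info : List (String × List (List String)))
    (h : (info.map Prod.fst).Nodup) :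
    (pruneA (info.map Prod.fst) (fillI i (flatP info) (initD info))).items =
      (fillI i (flatP info) PySem.Dict.empty).items := by
  set M := fillI i (flatP info) (initD info) with hM
  have hndinit : (initD info).keys.Nodup := by rw [keys_initD _ h]; exact h
  have hndM : M.keys.Nodup := nodup_keys_fillI _ _ _ hndinit
  have hkM : M.keys = info.map Prod.fst := keys_M i info h
  have hgM : ∀ c, M.getD c [] = valI i info c := by
    intro c; rw [hM, getD_fillI, getD_initD]; rfl
  set Bd := fillI i (flatP info) (PySem.Dict.empty : ParD) with hBd
  have hndB : Bd.keys.Nodup := nodup_keys_fillI _ _ _ PySem.Dict.nodup_keys_empty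
  have hkB : Bd.keys = PySem.Set.ofList (((flatP info).filter (fun x => clsOf x.2 == i)).map Prod.fst) := by
    rw [hBd, keys_fillI]; rfl
  have hgB : ∀ c, Bd.getD c [] = valI i info c := by
    intro c; rw [hBd, getD_fillI]; simp [valI]
  rw [pruneA_items _ _ hndM]
  rw [PySem.Dict.items_eq_map_keys M hndM [], PySem.Dict.items_eq_map_keys Bd hndB []]
  rw [hkM, hkB, ofList_flat i info h]
  rw [List.filter_map]
  have hmap : ∀ (l : List String),
      l.map (fun k => (k, M.getD k [])) = l.map (fun k => (k, valI i info k)) :=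
    fun l => List.map_congr_left (fun k _ => by rw [hgM])
  have hmapB : ∀ (l : List String),
      l.map (fun k => (k, Bd.getD k [])) = l.map (fun k => (k, valI i info k)) :=
    fun l => List.map_congr_left (fun k _ => by rw [hgB])
  rw [hmap, hmapB]
  have hfe : (info.map Prod.fst).filter
        ((fun p : String × List (List String) => !(decide (p.1 ∈ info.map Prod.fst) && decide (M.getD p.1 [] = []))) ∘ (fun k => (k, M.getD k [])))
      = (info.map Prod.fst).filter
        (fun k => decide (k ∈ ((flatP info).filter (fun x => clsOf x.2 == i)).map Prod.fst)) := by
    apply List.filter_congr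
    intro k hk
    by_cases hv : valI i info k = []
    · have hnotL : k ∉ ((flatP info).filter (fun x => clsOf x.2 == i)).map Prod.fst :=
        fun hc => ((valI_ne_iff i info k).mpr hc) hv
      simp [hgM, hk, hv, hnotL]
    · have hL : k ∈ ((flatP info).filter (fun x => clsOf x.2 == i)).map Prod.fst :=
        (valI_ne_iff i info k).mp hv
      simp [hgM, hk, hv, hL]
  rw [← hfe]

/-- the group-by over the flat list with empty start, as an items list, is `canon`. -/
lemma fill_empty_items (i : Nat) (info : List (String × List (List String)))
    (h : (info.map Prod.fst).Nodup) :
    (fillI i (flatP info) PySem.Dict.empty).items = canon i info := by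
  set Bd := fillI i (flatP info) (PySem.Dict.empty : ParD) with hBd
  have hndB : Bd.keys.Nodup := nodup_keys_fillI _ _ _ PySem.Dict.nodup_keys_empty
  have hgB : ∀ c, Bd.getD c [] = valI i info c := by
    intro c; rw [hBd, getD_fillI]; simp [valI]
  have hkB : Bd.keys = (info.map Prod.fst).filter
      (fun k => decide (k ∈ ((flatP info).filter (fun x => clsOf x.2 == i)).map Prod.fst)) := by
    rw [hBd, keys_fillI]
    have : PySem.Set.update ((PySem.Dict.empty : ParD).keys)
        (((flatP info).filter (fun x => clsOf x.2 == i)).map Prod.fst)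
        = PySem.Set.ofList (((flatP info).filter (fun x => clsOf x.2 == i)).map Prod.fst) := rfl
    rw [this, ofList_flat i info h]
  rw [PySem.Dict.items_eq_map_keys Bd hndB [], hkB, List.filter_map, List.map_map, canon]
  have hfilter : (info.filter ((fun k => decide (k ∈ ((flatP info).filter (fun x => clsOf x.2 == i)).map Prod.fst)) ∘ Prod.fst))
      = info.filter (fun p => decide (selF i p ≠ [])) := by
    apply List.filter_congr
    intro p hp
    simp only [Function.comp_apply, decide_eq_decide]
    rw [← valI_ne_iff, valI_eq_selF i info p h hp]
  rw [hfilter]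
  apply List.map_congr_left
  intro p hp
  have hp' : p ∈ info := List.mem_of_mem_filter hp
  simp only [Function.comp_apply, hgB, valI_eq_selF i info p h hp']

/-- a fold that skips elements satisfying P is a fold over the filtered-out list -/
lemma foldl_skipP {α β : Type} (P : α → Prop) [DecidablePred P] (f : β → α → β) (l : List α) (b : β) :
    l.foldl (fun d x => if P x then d else f d x) b
      = (l.filter (fun x => decide ¬ P x)).foldl f b := by
  induction l generalizing b with
  | nil => rfl
  | cons x l ih =>
    rw [List.foldl_cons, List.filter_cons]
    by_cases hx : P x
    · rw [if_pos hx, if_neg (by simp [hx]), ih]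
    · rw [if_neg hx, if_pos (by simp [hx]), List.foldl_cons, ih]

/-- B's bucket i, as an items list, is `canon`. -/
lemma bucketB_items (i : Nat) (info : List (String × List (List String)))
    (h : (info.map Prod.fst).Nodup) :
    (bucketB i info).items = canon i info := by
  have hb2 : bucketB i info =
      (info.filter (fun p => decide (selF i p ≠ []))).foldl
        (fun d p => d.insert p.1 (selF i p)) PySem.Dict.empty := by
    exact foldl_skipP (fun p => selF i p = [])
      (fun (d : ParD) (p : String × List (List String)) => d.insert p.1 (selF i p)) info
      PySem.Dict.empty
  rw [hb2]
  have hfresh : ∀ p ∈ info.filter (fun p => decide (selF i p ≠ [])),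
      (PySem.Dict.empty : ParD).contains p.1 = false := fun _ _ => rfl
  have hndf : ((info.filter (fun p => decide (selF i p ≠ []))).map Prod.fst).Nodup :=
    (List.Sublist.map Prod.fst List.filter_sublist).nodup h
  rw [PySem.Dict.items_foldl_insert_fresh _ _ _ _ hfresh hndf]
  simp [canon, PySem.Dict.empty]

theorem par_splitter_eq_alt (info : List (String × List (List String)))
    (hpre : Pre_par_splitter info) : par_splitter info = par_splitter_alt info := by
  obtain ⟨hnd, _⟩ := hpre
  have hkeys : (PySem.Dict.mk info).keys = info.map Prod.fst := rfl
  have hAloop : ∀ st : ParSt,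
      (PySem.Dict.mk info).keys.foldl
        (fun st lexeme => ((PySem.Dict.mk info).getD lexeme []).foldl (stepA lexeme) st) st
      = (flatP info).foldl (fun st x => stepB x.1 st x.2) st := by
    intro st
    rw [hkeys, List.foldl_map]
    have hcong : ∀ (acc : ParSt), ∀ p ∈ info,
        ((PySem.Dict.mk info).getD p.1 []).foldl (stepA p.1) acc = p.2.foldl (stepB p.1) acc := by
      intro acc p hp
      have hget : (PySem.Dict.mk info).getD p.1 [] = p.2 :=
        PySem.Dict.getD_of_mem_items (d := PySem.Dict.mk info) (k := p.1) (v := p.2) hp (hkeys ▸ hnd) []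
      rw [hget]
      exact PySem.List.foldl_congr_mem _ _ _ _ (fun acc wf _ => stepA_eq_stepB _ _ _)
    rw [PySem.List.foldl_congr_mem _ _ _ _ hcong]
    exact foldB_nested_eq_flat info st
  show par_splitter info = par_splitter_alt info
  simp only [par_splitter, par_splitter_alt]
  rw [hAloop]
  simp only [foldl_stepB_eq_fillI]
  have hc : ∀ i, (pruneA (PySem.Dict.mk info).keys (fillI i (flatP info)
      (PySem.Dict.ofList ((PySem.Dict.mk info).keys.map (fun k => (k, ([] : List (List String)))))))).items
      = (bucketB i info).items := by
    intro i
    rw [hkeys]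
    have hinit : PySem.Dict.ofList ((info.map Prod.fst).map (fun k => (k, ([] : List (List String)))))
        = initD info := rfl
    rw [hinit, comp_eq i info hnd, fill_empty_items i info hnd, bucketB_items i info hnd]
  exact Prod.ext (hc 0) (Prod.ext (hc 1) (Prod.ext (hc 2) (Prod.ext (hc 3) (hc 4))))

-- ===== VERDICT (by name: the statement is the Claim_ definition above) =====
theorem par_splitter_spec : Claim_equal_par_splitter := by
  intro info _ hpre
  show par_splitter info = par_splitter_alt info
  exact par_splitter_eq_alt info hpre
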